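-- pv_equiv track=rewrite | github.com/MartinMetarhizium/Drone_path | workers.py | serpentine_path
-- ===== SOURCE A (Python) =====
-- def serpentine_path(x_start, x_end, y_start, y_end):
--     path = []
--     for y in range(y_start, y_end):
--         if (y - y_start) % 2 == 0:
--             # left to right
--             for x in range(x_start, x_end):
--                 path.append((x, y))
--         else:
--             # right to left
--             for x in reversed(range(x_start, x_end)):
--                 path.append((x, y))
--     return path
-- ===== SOURCE B (Python) =====
-- def serpentine_path(x_start, x_end, y_start, y_end):
--     if x_start >= x_end or y_start >= y_end:
--         return []
--     path = []
--     x, y, going_right = x_start, y_start, True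
--     while y < y_end:
--         path.append((x, y))
--         nx = x + (1 if going_right else -1)
--         if nx < x_start or nx >= x_end:
--             going_right = not going_right
--             y += 1
--         else:
--             x = nx
--     return path
-- ===== Notes on version B (the rewrite author's own statement) =====
-- stated objective: alternative
-- what changed: B replaces the nested row loops with a parity branch by a single continuous snake walker that keeps (x, y, direction) as state, flipping direction and stepping y when the next x-step would leave the column range.
import Mathlib
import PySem

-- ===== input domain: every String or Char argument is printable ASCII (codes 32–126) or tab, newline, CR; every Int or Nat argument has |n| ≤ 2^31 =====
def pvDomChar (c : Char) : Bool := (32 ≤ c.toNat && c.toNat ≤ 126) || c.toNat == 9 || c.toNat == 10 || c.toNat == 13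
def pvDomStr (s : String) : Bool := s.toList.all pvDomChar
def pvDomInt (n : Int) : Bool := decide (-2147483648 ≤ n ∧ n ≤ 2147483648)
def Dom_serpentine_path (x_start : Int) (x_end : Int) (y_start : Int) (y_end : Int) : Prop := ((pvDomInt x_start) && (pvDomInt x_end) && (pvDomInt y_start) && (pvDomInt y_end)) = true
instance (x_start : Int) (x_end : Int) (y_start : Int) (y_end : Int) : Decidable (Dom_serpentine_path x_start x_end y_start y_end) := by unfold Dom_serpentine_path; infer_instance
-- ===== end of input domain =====

-- B replaces the nested row loops + parity branch by a single snake walker carrying (x, y, direction); same cost, different decomposition.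

-- ===== PORT A =====
def serpentine_path (x_start : Int) (x_end : Int) (y_start : Int) (y_end : Int) : List (Int × Int) :=
  (PySem.List.pyRange y_start y_end 1).foldl (fun path y =>
    if PySem.Int.mod (y - y_start) 2 == 0 then
      (PySem.List.pyRange x_start x_end 1).foldl (fun p x => p ++ [(x, y)]) path
    else
      ((PySem.List.pyRange x_start x_end 1).reverse).foldl (fun p x => p ++ [(x, y)]) path) []

-- ===== PORT B =====
-- the while loop of Source B; fuel = number of grid points makes it total (exact on every admitted input)
def snakeGo : Nat → Int → Int → Int → Int → Int → Bool → List (Int × Int)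
  | 0, _, _, _, _, _, _ => []
  | fuel+1, xs, xe, ye, x, y, dir =>
    if y < ye then
      (x, y) ::
        (if x + (if dir then 1 else -1) < xs ∨ xe ≤ x + (if dir then 1 else -1)
         then snakeGo fuel xs xe ye x (y + 1) (!dir)
         else snakeGo fuel xs xe ye (x + (if dir then 1 else -1)) y dir)
    else []

def serpentine_path_alt (x_start : Int) (x_end : Int) (y_start : Int) (y_end : Int) : List (Int × Int) :=
  if x_start < x_end ∧ y_start < y_end then
    snakeGo ((x_end - x_start).toNat * (y_end - y_start).toNat) x_start x_end y_end x_start y_start true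
  else []

-- ===== PRECONDITION & SPEC =====
def Spec_serpentine_path (x_start : Int) (x_end : Int) (y_start : Int) (y_end : Int) (out : List (Int × Int)) : Prop := out = serpentine_path_alt x_start x_end y_start y_end
instance (x_start : Int) (x_end : Int) (y_start : Int) (y_end : Int) (out : List (Int × Int)) : Decidable (Spec_serpentine_path x_start x_end y_start y_end out) := by unfold Spec_serpentine_path; infer_instance

-- ===== CLAIM (what is proved, stated in full; the proofs are below) =====
def Claim_equal_serpentine_path : Prop := ∀ (x_start : Int) (x_end : Int) (y_start : Int) (y_end : Int), Dom_serpentine_path x_start x_end y_start y_end → Spec_serpentine_path x_start x_end y_start y_end (serpentine_path x_start x_end y_start y_end)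

-- ===== LEMMAS AND PROOFS =====

lemma snakeGo_succ (f : Nat) (xs xe ye x y : Int) (dir : Bool) :
    snakeGo (f + 1) xs xe ye x y dir =
      if y < ye then
        (x, y) ::
          (if x + (if dir then 1 else -1) < xs ∨ xe ≤ x + (if dir then 1 else -1)
           then snakeGo f xs xe ye x (y + 1) (!dir)
           else snakeGo f xs xe ye (x + (if dir then 1 else -1)) y dir)
      else [] := rfl

-- both sides equal this explicit row-by-row description
def rowsFrom (xs xe : Int) : Nat → Int → Bool → List (Int × Int)
  | 0, _, _ => []
  | m+1, y, dir =>
     (if dir then (PySem.List.pyRange xs xe 1).map (fun i => (i, y))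
      else ((PySem.List.pyRange xs xe 1).reverse).map (fun i => (i, y)))
     ++ rowsFrom xs xe m (y + 1) (!dir)

lemma rowsFrom_succ (xs xe : Int) (m : Nat) (y : Int) (dir : Bool) :
    rowsFrom xs xe (m + 1) y dir =
      (if dir then (PySem.List.pyRange xs xe 1).map (fun i => (i, y))
       else ((PySem.List.pyRange xs xe 1).reverse).map (fun i => (i, y)))
      ++ rowsFrom xs xe m (y + 1) (!dir) := rfl

lemma snake_right (xs xe ye : Int) : ∀ (n rest : Nat) (x y : Int), y < ye → xs ≤ x → x + ((n : Int) + 1) = xe →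
    snakeGo (n + 1 + rest) xs xe ye x y true
      = (PySem.List.pyRange x xe 1).map (fun i => (i, y)) ++ snakeGo rest xs xe ye (xe - 1) (y + 1) false := by
  intro n
  induction n with
  | zero =>
    intro rest x y hy hx hxe
    rw [show (0 + 1 + rest : Nat) = rest + 1 from by omega, snakeGo_succ, if_pos hy]
    simp only [if_true, Bool.not_true]
    rw [if_pos (Or.inr (by omega))]
    rw [show PySem.List.pyRange x xe 1 = [x] from by rw [show xe = x + 1 from by omega]; exact PySem.List.pyRange_one_singleton x]
    rw [show xe - 1 = x from by omega]
    simp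
  | succ m ih =>
    intro rest x y hy hx hxe
    rw [show (m + 1 + 1 + rest : Nat) = (m + 1 + rest) + 1 from by omega, snakeGo_succ, if_pos hy]
    simp only [if_true, Bool.not_true]
    rw [if_neg (by push_cast at hxe ⊢; omega)]
    rw [ih rest (x + 1) y hy (by omega) (by push_cast at hxe ⊢; omega)]
    rw [show PySem.List.pyRange x xe 1 = x :: PySem.List.pyRange (x + 1) xe 1 from PySem.List.pyRange_one_cons (by push_cast at hxe; omega)]
    simp

lemma snake_left (xs xe ye : Int) : ∀ (n rest : Nat) (x y : Int), y < ye → x < xe → x = xs + (n : Int) →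
    snakeGo (n + 1 + rest) xs xe ye x y false
      = ((PySem.List.pyRange xs (x + 1) 1).reverse).map (fun i => (i, y)) ++ snakeGo rest xs xe ye xs (y + 1) true := by
  intro n
  induction n with
  | zero =>
    intro rest x y hy hx hxs
    rw [show (0 + 1 + rest : Nat) = rest + 1 from by omega, snakeGo_succ, if_pos hy]
    simp only [Bool.false_eq_true, if_false, Bool.not_false]
    rw [if_pos (Or.inl (by push_cast at hxs; omega))]
    rw [show x = xs from by push_cast at hxs; omega]
    rw [PySem.List.pyRange_one_singleton]
    simp
  | succ m ih =>
    intro rest x y hy hx hxs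
    rw [show (m + 1 + 1 + rest : Nat) = (m + 1 + rest) + 1 from by omega, snakeGo_succ, if_pos hy]
    simp only [Bool.false_eq_true, if_false, Bool.not_false]
    rw [if_neg (by push_cast at hxs ⊢; omega)]
    rw [show x + (-1) = x - 1 from by ring]
    rw [ih rest (x - 1) y hy (by omega) (by push_cast at hxs ⊢; omega)]
    rw [show PySem.List.pyRange xs (x + 1) 1 = PySem.List.pyRange xs x 1 ++ [x] from by
      have := PySem.List.pyRange_one_succ_right (a := xs) (b := x) (by push_cast at hxs; omega)
      exact this]
    rw [show x - 1 + 1 = x from by ring]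
    simp

lemma snake_rows (xs xe ye : Int) (hx : xs < xe) : ∀ (m : Nat) (y : Int) (dir : Bool), y + (m : Int) = ye →
    snakeGo (m * (xe - xs).toNat) xs xe ye (if dir then xs else xe - 1) y dir = rowsFrom xs xe m y dir := by
  intro m
  induction m with
  | zero => intro y dir _; simp [snakeGo, rowsFrom]
  | succ k ih =>
    intro y dir hye
    push_cast at hye
    have hy : y < ye := by omega
    obtain ⟨n, hW⟩ : ∃ n : Nat, (xe - xs).toNat = n + 1 := ⟨(xe - xs).toNat - 1, by omega⟩
    rw [show (k + 1) * (xe - xs).toNat = n + 1 + k * (xe - xs).toNat from by rw [hW]; ring]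
    have ihf := ih (y + 1) false (by omega)
    have iht := ih (y + 1) true (by omega)
    rw [if_neg (by simp)] at ihf
    rw [if_pos rfl] at iht
    cases dir with
    | true =>
      rw [if_pos rfl]
      rw [snake_right xs xe ye n (k * (xe - xs).toNat) xs y hy le_rfl (by omega)]
      rw [ihf, rowsFrom_succ]
      simp
    | false =>
      rw [if_neg (by simp)]
      rw [snake_left xs xe ye n (k * (xe - xs).toNat) (xe - 1) y hy (by omega) (by omega)]
      rw [iht, rowsFrom_succ]
      rw [show xe - 1 + 1 = xe from by ring]
      simp

lemma foldA (xs xe ys : Int) : ∀ (m : Nat) (y : Int) (dir : Bool) (p : List (Int × Int)),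
    PySem.Int.mod (y - ys) 2 = (if dir then 0 else 1) →
    (PySem.List.pyRange y (y + (m : Int)) 1).foldl (fun path yy =>
      if PySem.Int.mod (yy - ys) 2 == 0 then
        (PySem.List.pyRange xs xe 1).foldl (fun q x => q ++ [(x, yy)]) path
      else
        ((PySem.List.pyRange xs xe 1).reverse).foldl (fun q x => q ++ [(x, yy)]) path) p
    = p ++ rowsFrom xs xe m y dir := by
  intro m
  induction m with
  | zero => intro y dir p _; simp [rowsFrom]
  | succ k ih =>
    intro y dir p h
    rw [show PySem.List.pyRange y (y + ((k + 1 : Nat) : Int)) 1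
          = y :: PySem.List.pyRange (y + 1) (y + ((k + 1 : Nat) : Int)) 1 from
        PySem.List.pyRange_one_cons (by push_cast; omega)]
    rw [List.foldl_cons]
    have hmod : PySem.Int.mod (y - ys) 2 = (y - ys) % 2 := PySem.Int.mod_eq_emod_of_pos (by norm_num)
    have hmod' : PySem.Int.mod (y + 1 - ys) 2 = (y + 1 - ys) % 2 := PySem.Int.mod_eq_emod_of_pos (by norm_num)
    have h2 : PySem.Int.mod (y + 1 - ys) 2 = (if !dir then 0 else 1) := by
      rw [hmod']; rw [hmod] at h
      cases dir <;> simp_all <;> omega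
    have step : (if PySem.Int.mod (y - ys) 2 == 0 then
        (PySem.List.pyRange xs xe 1).foldl (fun q x => q ++ [(x, y)]) p
      else
        ((PySem.List.pyRange xs xe 1).reverse).foldl (fun q x => q ++ [(x, y)]) p)
      = p ++ (if dir then (PySem.List.pyRange xs xe 1).map (fun i => (i, y))
              else ((PySem.List.pyRange xs xe 1).reverse).map (fun i => (i, y))) := by
      cases dir with
      | true =>
        rw [if_pos rfl] at h
        rw [h, if_pos (by decide), if_pos rfl]
        exact PySem.List.foldl_append_singleton_eq_map _ _ _
      | false =>
        rw [if_neg (by simp)] at h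
        rw [h, if_neg (by decide), if_neg (by simp)]
        exact PySem.List.foldl_append_singleton_eq_map _ _ _
    rw [step]
    rw [show y + ((k + 1 : Nat) : Int) = (y + 1) + ((k : Nat) : Int) from by push_cast; ring]
    rw [ih (y + 1) (!dir) _ h2, rowsFrom_succ, List.append_assoc]

lemma a_eq_rows (xs xe ys ye : Int) (h : ys < ye) :
    serpentine_path xs xe ys ye = rowsFrom xs xe (ye - ys).toNat ys true := by
  unfold serpentine_path
  rw [show PySem.List.pyRange ys ye 1 = PySem.List.pyRange ys (ys + (((ye - ys).toNat : Nat) : Int)) 1 from by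
    congr 1; omega]
  rw [foldA xs xe ys (ye - ys).toNat ys true []
      (by rw [PySem.Int.mod_eq_emod_of_pos (by norm_num)]; simp)]
  simp

lemma rowsFrom_empty (xs xe : Int) (hx : xe ≤ xs) : ∀ (m : Nat) (y : Int) (dir : Bool), rowsFrom xs xe m y dir = [] := by
  intro m
  induction m with
  | zero => intro y dir; rfl
  | succ k ih =>
    intro y dir
    unfold rowsFrom
    rw [PySem.List.pyRange_one_eq_nil hx]
    simp [ih]

-- ===== VERDICT (by name: the statement is the Claim_ definition above) =====
theorem serpentine_path_spec : Claim_equal_serpentine_path := by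
  intro xs xe ys ye _
  unfold Spec_serpentine_path serpentine_path_alt
  by_cases hy : ys < ye
  · rw [a_eq_rows xs xe ys ye hy]
    by_cases hx : xs < xe
    · rw [if_pos ⟨hx, hy⟩, Nat.mul_comm]
      have := snake_rows xs xe ye hx (ye - ys).toNat ys true (by omega)
      rw [if_pos rfl] at this
      rw [← this]
    · rw [if_neg (by tauto), rowsFrom_empty xs xe (by omega)]
  · rw [if_neg (by tauto)]
    unfold serpentine_path
    rw [show PySem.List.pyRange ys ye 1 = [] from PySem.List.pyRange_one_eq_nil (by omega)]
    rfl
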